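-- pv_equiv track=rewrite | github.com/mrinalmanu/SD_Python | week_2_hw_1_protein_translation.py | find_prots
-- ===== SOURCE A (Python) =====
-- def oframe(amino):
--     oframes = []
--     for i in range(0,len(amino)):
--         if amino[i]=='M':
--             temp = ''.join([amino[i::]])
--             oframe=temp[0:temp.find('_')+1]
--             oframes.append(oframe)
--     return oframes
--
-- def find_prots(dictionary):
--     prots_dict = {}
--     for key, value in dictionary.items():
--         poss_protein = []
--         for f in value:
--             poss_protein += (oframe(value[f]))
--             #print key, poss_protein
--             c = 0
--             result = ""
--             for s in poss_protein:
--                 if len(s) > c: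
--                     result = s
--                     c = len(s)
--                 else:
--                     continue
--             prots_dict[key] = result
--
--     return prots_dict
-- ===== SOURCE B (Python) =====
-- def find_prots(dictionary):
--     prots = {}
--     for key, value in dictionary.items():
--         if not value:
--             continue
--         best = ""
--         for amino in value.values():
--             m = -1  # index of earliest 'M' with no '_' seen since; -1 = no open window
--             for i, ch in enumerate(amino):
--                 if ch == 'M':
--                     if m < 0:
--                         m = i
--                 elif ch == '_':
--                     if m >= 0 and i - m + 1 > len(best):
--                         best = amino[m:i + 1]
--                     m = -1
--         prots[key] = best
--     return prots
-- ===== Notes on version B (the rewrite author's own statement) =====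
-- stated objective: alternative
-- what changed: A slices a candidate protein at every 'M' (scanning forward to the stop each time) and re-folds the whole accumulated candidate list after every inner dict entry; B makes a single left-to-right pass per sequence, remembering only the earliest 'M' of the current window and building a candidate only when a stop '_' is reached.
import Mathlib
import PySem

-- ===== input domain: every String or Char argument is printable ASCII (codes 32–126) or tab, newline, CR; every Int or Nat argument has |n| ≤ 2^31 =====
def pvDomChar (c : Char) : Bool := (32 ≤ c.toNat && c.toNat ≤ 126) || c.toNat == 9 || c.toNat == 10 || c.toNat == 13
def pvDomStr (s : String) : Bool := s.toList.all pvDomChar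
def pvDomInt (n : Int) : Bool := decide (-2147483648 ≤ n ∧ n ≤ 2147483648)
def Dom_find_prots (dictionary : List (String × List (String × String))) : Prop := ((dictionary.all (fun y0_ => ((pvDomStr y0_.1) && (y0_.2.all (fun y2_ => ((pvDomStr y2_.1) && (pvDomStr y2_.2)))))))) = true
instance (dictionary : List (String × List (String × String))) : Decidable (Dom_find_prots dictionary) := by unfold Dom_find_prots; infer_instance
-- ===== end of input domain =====

-- B replaces A's per-'M' slice-and-refold by a single left-to-right pass per sequence that
-- remembers the earliest 'M' of the current window and builds a candidate only at each stop
-- '_'; objective: alternative (a genuinely different traversal, not measured faster here).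
-- Equivalence is proved on the RETURN value for all inputs (dicts are received as
-- insertion-ordered association lists; both ports read them through PySem.Dict.ofList,
-- exactly as Python's dict() constructor collapses duplicate keys).

-- ===== PORT A =====
-- strings are handled on their code-point lists (PySem.Chars / PySem.List primitives), exact per PYSEM
def oframe (amino : String) : List (List Char) :=
  (PySem.List.pyRange 0 (amino.toList.length : Int) 1).foldl (fun oframes i =>
    if PySem.List.pyGetD amino.toList i ' ' = 'M' then
      let temp := PySem.Chars.join [] [PySem.List.slice amino.toList (some i) none]
      oframes ++ [PySem.List.slice temp (some 0) (some (PySem.Chars.find temp ['_'] + 1))]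
    else oframes) []

def find_prots (dictionary : List (String × List (String × String))) : List (String × String) :=
  ((PySem.Dict.ofList dictionary).items.foldl
    (fun (prots_dict : PySem.Dict String String) kv =>
      let value := PySem.Dict.ofList kv.2
      ((value.keys.foldl
        (fun (st : List (List Char) × PySem.Dict String String) f =>
          let poss_protein := st.1 ++ oframe (PySem.Dict.getD value f "")
          let cr := poss_protein.foldl
            (fun (cr : Int × List Char) s =>
              if (s.length : Int) > cr.1 then ((s.length : Int), s) else cr)
            (0, [])
          (poss_protein, st.2.insert kv.1 (String.ofList cr.2)))
        ([], prots_dict)).2))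
    PySem.Dict.empty).items

-- ===== PORT B =====
def find_prots_alt (dictionary : List (String × List (String × String))) : List (String × String) :=
  ((PySem.Dict.ofList dictionary).items.foldl
    (fun (prots : PySem.Dict String String) kv =>
      let value := PySem.Dict.ofList kv.2
      if value.items.isEmpty then prots
      else
        let best := value.values.foldl
          (fun (best : List Char) amino =>
            let cs := amino.toList
            ((PySem.List.enumerate cs 0).foldl
              (fun (st : Int × List Char) p =>
                if p.2 = 'M' then (if st.1 < 0 then (p.1, st.2) else st)
                else if p.2 = '_' then
                  (-1, if 0 ≤ st.1 ∧ p.1 - st.1 + 1 > (st.2.length : Int)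
                       then PySem.List.slice cs (some st.1) (some (p.1 + 1)) else st.2)
                else st)
              ((-1 : Int), best)).2)
          []
        prots.insert kv.1 (String.ofList best))
    PySem.Dict.empty).items

-- ===== PRECONDITION & SPEC =====
def Spec_find_prots (dictionary : List (String × List (String × String))) (out : List (String × String)) : Prop := out = find_prots_alt dictionary
instance (dictionary : List (String × List (String × String))) (out : List (String × String)) : Decidable (Spec_find_prots dictionary out) := by unfold Spec_find_prots; infer_instance

-- ===== CLAIM (what is proved, stated in full; the proofs are below) =====
def Claim_equal_find_prots : Prop := ∀ (dictionary : List (String × List (String × String))), Dom_find_prots dictionary → Spec_find_prots dictionary (find_prots dictionary)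


-- ===== LEMMAS AND PROOFS =====

-- segment of a sequence up to and including its first stop '_', if any
def segOpt : List Char → Option (List Char)
  | [] => none
  | c :: t => if c = '_' then some ['_'] else (segOpt t).map (c :: ·)

-- A's open reading frames, as a structural recursion over the character list
def frames : List Char → List (List Char)
  | [] => []
  | c :: t => (if c = 'M' then [(segOpt (c :: t)).getD []] else []) ++ frames t

-- keep the strictly longer candidate (A's max loop step)
def compete (b s : List Char) : List Char := if s.length > b.length then s else b

-- B's one-pass scan, structurally: pend = chars from the earliest 'M' of the open window
def scan : List Char → Option (List Char) → List Char → List Char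
  | [], _, best => best
  | c :: t, none, best =>
      if c = 'M' then scan t (some ['M']) best else scan t none best
  | c :: t, some w, best =>
      if c = '_' then scan t none (compete best (w ++ ['_']))
      else scan t (some (w ++ [c])) best

def pendFrame (w : List Char) (cs : List Char) : List Char :=
  match segOpt cs with
  | some s => w ++ s
  | none => []

theorem length_compete (b s : List Char) : (compete b s).length = max b.length s.length := by
  unfold compete; split_ifs with h <;> omega

theorem compete_nil (b : List Char) : compete b [] = b := by simp [compete]

theorem compete_of_le (b p s : List Char) (h : s.length ≤ p.length) :
    compete (compete b p) s = compete b p := by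
  have hl := length_compete b p
  rw [compete.eq_def, if_neg (by omega)]

theorem pendFrame_cons (w : List Char) (c : Char) (t : List Char) (hc : c ≠ '_') :
    pendFrame w (c :: t) = pendFrame (w ++ [c]) t := by
  cases hseg : segOpt t <;> simp [pendFrame, segOpt, hc, hseg]

theorem frames_cons_of_ne (c : Char) (t : List Char) (hc : c ≠ 'M') :
    frames (c :: t) = frames t := by simp [frames, hc]

theorem frames_cons_M (t : List Char) :
    frames ('M' :: t) = (segOpt ('M' :: t)).getD [] :: frames t := by simp [frames]

theorem pendFrame_M (t : List Char) :
    pendFrame ['M'] t = (segOpt ('M' :: t)).getD [] := by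
  cases hseg : segOpt t <;> simp [pendFrame, segOpt, hseg]

theorem scan_eq_foldl_frames (cs : List Char) :
    (∀ w best, 0 < w.length →
      scan cs (some w) best = (frames cs).foldl compete (compete best (pendFrame w cs)))
    ∧ (∀ best, scan cs none best = (frames cs).foldl compete best) := by
  induction cs with
  | nil =>
    refine ⟨fun w best _ => ?_, fun best => rfl⟩
    simp [scan, frames, pendFrame, segOpt, compete_nil]
  | cons c t ih =>
    obtain ⟨ih1, ih2⟩ := ih
    constructor
    · intro w best hw
      by_cases hc : c = '_'
      · subst hc
        rw [show scan ('_' :: t) (some w) best = scan t none (compete best (w ++ ['_'])) from by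
          simp [scan]]
        rw [ih2, frames_cons_of_ne _ _ (by decide)]
        have : pendFrame w ('_' :: t) = w ++ ['_'] := by simp [pendFrame, segOpt]
        rw [this]
      · by_cases hM : c = 'M'
        · subst hM
          rw [show scan ('M' :: t) (some w) best = scan t (some (w ++ ['M'])) best from by
            simp [scan]]
          rw [ih1 _ best (by simp), frames_cons_M, List.foldl_cons]
          rw [pendFrame_cons w 'M' t (by decide)]
          congr 1
          cases hseg : segOpt t with
          | none =>
            have h1 : (segOpt ('M' :: t)).getD [] = [] := by simp [segOpt, hseg]
            rw [h1, compete_nil]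
          | some s =>
            have h1 : (segOpt ('M' :: t)).getD [] = 'M' :: s := by simp [segOpt, hseg]
            have h2 : pendFrame (w ++ ['M']) t = (w ++ ['M']) ++ s := by simp [pendFrame, hseg]
            rw [h1, h2, compete_of_le]
            simp only [List.length_append, List.length_cons]
            omega
        · rw [show scan (c :: t) (some w) best = scan t (some (w ++ [c])) best from by
            simp [scan, hc]]
          rw [ih1 _ best (by simp), frames_cons_of_ne _ _ hM, pendFrame_cons w c t hc]
    · intro best
      by_cases hM : c = 'M'
      · subst hM
        rw [show scan ('M' :: t) none best = scan t (some ['M']) best from by simp [scan]]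
        rw [ih1 _ best (by decide), frames_cons_M, List.foldl_cons, pendFrame_M]
      · rw [show scan (c :: t) none best = scan t none best from by simp [scan, hM]]
        rw [ih2, frames_cons_of_ne _ _ hM]

theorem segOpt_eq_none_of_not_mem (cs : List Char) (h : '_' ∉ cs) : segOpt cs = none := by
  induction cs with
  | nil => rfl
  | cons c t ih =>
    by_cases hc : c = '_'
    · subst hc; exact absurd (by simp) h
    · simp only [List.mem_cons, not_or] at h
      simp [segOpt, hc, ih h.2]

theorem segOpt_spec (cs : List Char) (j : Nat) (hj : cs[j]? = some '_')
    (hmin : ∀ i, i < j → cs[i]? ≠ some '_') : segOpt cs = some (cs.take (j + 1)) := by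
  induction cs generalizing j with
  | nil => simp at hj
  | cons c t ih =>
    by_cases hc : c = '_'
    · subst hc
      have hj0 : j = 0 := by
        by_contra h
        exact hmin 0 (by omega) (by simp)
      subst hj0
      simp [segOpt]
    · cases j with
      | zero => simp [hc] at hj
      | succ j' =>
        have h1 : t[j']? = some '_' := by simpa using hj
        have h2 : ∀ i, i < j' → t[i]? ≠ some '_' := by
          intro i hi
          have := hmin (i + 1) (by omega)
          simpa using this
        simp [segOpt, hc, ih j' h1 h2]

theorem singleton_prefix_iff (a : Char) (l : List Char) : [a] <+: l ↔ l.head? = some a := by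
  constructor
  · rintro ⟨s, rfl⟩; rfl
  · intro h
    cases l with
    | nil => simp at h
    | cons x xs => simp at h; exact ⟨xs, by simp [h]⟩

theorem take_find_stop (cs : List Char) :
    cs.take ((PySem.Chars.find cs ['_'] + 1).toNat) = (segOpt cs).getD [] := by
  by_cases hmem : '_' ∈ cs
  · obtain ⟨s, t', rfl⟩ := List.append_of_mem hmem
    set cs := s ++ '_' :: t' with hcs
    have hinfix : ['_'] <:+: cs := ⟨s, t', by simp [hcs]⟩
    have hnn : 0 ≤ PySem.Chars.find cs ['_'] := (PySem.Chars.find_nonneg_iff cs ['_']).mpr hinfix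
    obtain ⟨hpre, hminp⟩ := PySem.Chars.find_spec hnn
    set j := (PySem.Chars.find cs ['_']).toNat with hjdef
    have hj : cs[j]? = some '_' := by
      rw [← List.head?_drop]
      exact (singleton_prefix_iff _ _).mp hpre
    have hmin : ∀ i, i < j → cs[i]? ≠ some '_' := by
      intro i hi h
      exact hminp i hi ((singleton_prefix_iff _ _).mpr (by rw [List.head?_drop]; exact h))
    rw [segOpt_spec cs j hj hmin]
    have : (PySem.Chars.find cs ['_'] + 1).toNat = j + 1 := by omega
    rw [this]
    rfl
  · have hninf : ¬ ['_'] <:+: cs := by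
      intro h
      exact hmem (h.sublist.subset (by simp))
    rw [(PySem.Chars.find_eq_neg_one_iff cs ['_']).mpr hninf]
    rw [segOpt_eq_none_of_not_mem cs hmem]
    rfl

theorem oframe_body_seg (l : List Char) :
    PySem.List.slice l (some 0) (some (PySem.Chars.find l ['_'] + 1)) = (segOpt l).getD [] := by
  rw [PySem.List.slice_zero_start]
  rw [PySem.List.slice_to]
  · exact take_find_stop l
  · have := PySem.Chars.neg_one_le_find l ['_']
    omega

theorem oframe_aux (cs : List Char) : ∀ acc : List (List Char),
    (List.range cs.length).foldl (fun oframes (j : Nat) =>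
      if PySem.List.pyGetD cs (j : Int) ' ' = 'M' then
        let temp := PySem.Chars.join [] [PySem.List.slice cs (some (j : Int)) none]
        oframes ++ [PySem.List.slice temp (some 0) (some (PySem.Chars.find temp ['_'] + 1))]
      else oframes) acc = acc ++ frames cs := by
  induction cs with
  | nil => intro acc; simp [frames]
  | cons c t ih =>
    intro acc
    rw [List.length_cons, List.range_succ_eq_map, List.foldl_cons, List.foldl_map]
    have hshift : (fun (oframes : List (List Char)) (j : Nat) =>
        if PySem.List.pyGetD (c :: t) ((j + 1 : Nat) : Int) ' ' = 'M' then
          let temp := PySem.Chars.join [] [PySem.List.slice (c :: t) (some ((j + 1 : Nat) : Int)) none]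
          oframes ++ [PySem.List.slice temp (some 0) (some (PySem.Chars.find temp ['_'] + 1))]
        else oframes)
        = (fun (oframes : List (List Char)) (j : Nat) =>
          if PySem.List.pyGetD t (j : Int) ' ' = 'M' then
            let temp := PySem.Chars.join [] [PySem.List.slice t (some (j : Int)) none]
            oframes ++ [PySem.List.slice temp (some 0) (some (PySem.Chars.find temp ['_'] + 1))]
          else oframes) := by
      funext oframes j
      rw [PySem.List.pyGetD_natCast, PySem.List.pyGetD_natCast,
        PySem.List.slice_from_natCast, PySem.List.slice_from_natCast]
      simp
    simp only [hshift]
    rw [ih]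
    simp only [PySem.Chars.join_singleton, PySem.List.pyGetD_natCast,
      PySem.List.slice_from_natCast, List.drop_zero, oframe_body_seg]
    rw [frames]
    by_cases hc : c = 'M' <;> simp [hc, List.append_assoc]

theorem oframe_eq_frames (amino : String) : oframe amino = frames amino.toList := by
  unfold oframe
  rw [PySem.List.pyRange_one, show (((amino.toList.length : Int)) - 0).toNat = amino.toList.length from by omega,
    List.foldl_map]
  have := oframe_aux amino.toList []
  simp only [zero_add] at this ⊢
  exact this

theorem maxrun_eq_foldl_compete (l : List (List Char)) : ∀ b : List Char,
    l.foldl (fun (cr : Int × List Char) s =>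
        if (s.length : Int) > cr.1 then ((s.length : Int), s) else cr)
      ((b.length : Int), b)
      = (((l.foldl compete b).length : Int), l.foldl compete b) := by
  induction l with
  | nil => intro b; rfl
  | cons s l' ih =>
    intro b
    rw [List.foldl_cons, List.foldl_cons]
    dsimp only
    by_cases h : s.length > b.length
    · rw [if_pos (by exact_mod_cast h), show compete b s = s from by simp [compete, h]]
      exact ih s
    · rw [if_neg (by exact_mod_cast h), show compete b s = b from by simp [compete, h]]
      exact ih b

theorem bscan_aux (cs : List Char) : ∀ (t : List Char) (i : Nat), cs.drop i = t → ∀ best : List Char,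
    (∀ m : Nat, m < i →
      ((PySem.List.enumerate t (i : Int)).foldl
        (fun (st : Int × List Char) p =>
          if p.2 = 'M' then (if st.1 < 0 then (p.1, st.2) else st)
          else if p.2 = '_' then
            (-1, if 0 ≤ st.1 ∧ p.1 - st.1 + 1 > (st.2.length : Int)
                 then PySem.List.slice cs (some st.1) (some (p.1 + 1)) else st.2)
          else st)
        (((m : Nat) : Int), best)).2
        = scan t (some ((cs.drop m).take (i - m))) best)
    ∧ ((PySem.List.enumerate t (i : Int)).foldl
        (fun (st : Int × List Char) p =>
          if p.2 = 'M' then (if st.1 < 0 then (p.1, st.2) else st)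
          else if p.2 = '_' then
            (-1, if 0 ≤ st.1 ∧ p.1 - st.1 + 1 > (st.2.length : Int)
                 then PySem.List.slice cs (some st.1) (some (p.1 + 1)) else st.2)
          else st)
        ((-1 : Int), best)).2 = scan t none best := by
  intro t
  induction t with
  | nil =>
    intro i _ best
    exact ⟨fun m _ => rfl, rfl⟩
  | cons c t' ih =>
    intro i hdrop best
    have hi : i < cs.length := by
      by_contra h
      rw [List.drop_eq_nil_of_le (by omega)] at hdrop
      simp at hdrop
    have hdrop' : cs.drop (i + 1) = t' := by
      rw [← List.tail_drop, hdrop]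
      rfl
    have hci : cs[i]? = some c := by
      have : (cs.drop i)[0]? = some c := by rw [hdrop]; rfl
      simpa using this
    have henum : PySem.List.enumerate (c :: t') (i : Int)
        = ((i : Int), c) :: PySem.List.enumerate t' (((i + 1 : Nat)) : Int) := by
      rw [PySem.List.enumerate_cons]
      push_cast
      ring_nf
    have htake : ∀ m : Nat, m ≤ i → (cs.drop m).take (i + 1 - m) = (cs.drop m).take (i - m) ++ [c] := by
      intro m hm
      rw [show i + 1 - m = (i - m) + 1 from by omega, List.take_add_one]
      congr 1
      have : (cs.drop m)[i - m]? = cs[m + (i - m)]? := List.getElem?_drop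
      rw [this, show m + (i - m) = i from by omega, hci]
      rfl
    constructor
    · intro m hm
      have hwlen : ((cs.drop m).take (i - m)).length = i - m := by
        simp [List.length_take, List.length_drop]; omega
      rw [henum, List.foldl_cons]
      by_cases hM : c = 'M'
      · subst hM
        rw [show (if ('M' : Char) = 'M' then (if ((m : Nat) : Int) < 0 then ((i : Int), best) else (((m : Nat) : Int), best))
            else if ('M' : Char) = '_' then ((-1 : Int), if 0 ≤ ((m : Nat) : Int) ∧ (i : Int) - ((m : Nat) : Int) + 1 > (best.length : Int)
                 then PySem.List.slice cs (some ((m : Nat) : Int)) (some ((i : Int) + 1)) else best)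
            else (((m : Nat) : Int), best)) = (((m : Nat) : Int), best) from by
          rw [if_pos rfl, if_neg (by omega)]]
        rw [(ih (i + 1) hdrop' best).1 m (by omega)]
        rw [show scan ('M' :: t') (some ((cs.drop m).take (i - m))) best
            = scan t' (some ((cs.drop m).take (i - m) ++ ['M'])) best from by simp [scan]]
        rw [htake m (by omega)]
      · by_cases hS : c = '_'
        · subst hS
          have hslice : PySem.List.slice cs (some ((m : Nat) : Int)) (some ((i : Int) + 1))
              = (cs.drop m).take (i - m) ++ ['_'] := by
            rw [show ((i : Int) + 1) = (((i + 1 : Nat)) : Int) from by push_cast; ring,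
              PySem.List.slice_natCast, htake m (by omega)]
          rw [show (if ('_' : Char) = 'M' then (if ((m : Nat) : Int) < 0 then ((i : Int), best) else (((m : Nat) : Int), best))
              else if ('_' : Char) = '_' then ((-1 : Int), if 0 ≤ ((m : Nat) : Int) ∧ (i : Int) - ((m : Nat) : Int) + 1 > (best.length : Int)
                   then PySem.List.slice cs (some ((m : Nat) : Int)) (some ((i : Int) + 1)) else best)
              else (((m : Nat) : Int), best))
              = ((-1 : Int), compete best ((cs.drop m).take (i - m) ++ ['_'])) from by
            rw [if_neg (by decide), if_pos rfl]
            congr 1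
            rw [hslice]
            have hlen : ((cs.drop m).take (i - m) ++ ['_']).length = i - m + 1 := by
              simp [hwlen]
            by_cases hcond : i - m + 1 > best.length
            · rw [if_pos (by refine ⟨by omega, by omega⟩),
                show compete best ((cs.drop m).take (i - m) ++ ['_']) = (cs.drop m).take (i - m) ++ ['_'] from by
                  simp [compete, hlen, hcond]]
            · rw [if_neg (by omega),
                show compete best ((cs.drop m).take (i - m) ++ ['_']) = best from by
                  simp [compete, hlen]; omega]]
          rw [(ih (i + 1) hdrop' _).2]
          simp [scan]
        · rw [show (if c = 'M' then (if ((m : Nat) : Int) < 0 then ((i : Int), best) else (((m : Nat) : Int), best))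
              else if c = '_' then ((-1 : Int), if 0 ≤ ((m : Nat) : Int) ∧ (i : Int) - ((m : Nat) : Int) + 1 > (best.length : Int)
                   then PySem.List.slice cs (some ((m : Nat) : Int)) (some ((i : Int) + 1)) else best)
              else (((m : Nat) : Int), best)) = (((m : Nat) : Int), best) from by
            rw [if_neg hM, if_neg hS]]
          rw [(ih (i + 1) hdrop' best).1 m (by omega)]
          rw [show scan (c :: t') (some ((cs.drop m).take (i - m))) best
              = scan t' (some ((cs.drop m).take (i - m) ++ [c])) best from by simp [scan, hS]]
          rw [htake m (by omega)]
    · rw [henum, List.foldl_cons]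
      by_cases hM : c = 'M'
      · subst hM
        rw [show (if ('M' : Char) = 'M' then (if (-1 : Int) < 0 then ((i : Int), best) else ((-1 : Int), best))
            else if ('M' : Char) = '_' then ((-1 : Int), if 0 ≤ (-1 : Int) ∧ (i : Int) - (-1 : Int) + 1 > (best.length : Int)
                 then PySem.List.slice cs (some (-1 : Int)) (some ((i : Int) + 1)) else best)
            else ((-1 : Int), best)) = (((i : Nat) : Int), best) from by
          rw [if_pos rfl, if_pos (by omega)]]
        rw [(ih (i + 1) hdrop' best).1 i (by omega)]
        rw [show (cs.drop i).take (i + 1 - i) = ['M'] from by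
          rw [show i + 1 - i = 1 from by omega, hdrop]; rfl]
        simp [scan]
      · by_cases hS : c = '_'
        · subst hS
          rw [show (if ('_' : Char) = 'M' then (if (-1 : Int) < 0 then ((i : Int), best) else ((-1 : Int), best))
              else if ('_' : Char) = '_' then ((-1 : Int), if 0 ≤ (-1 : Int) ∧ (i : Int) - (-1 : Int) + 1 > (best.length : Int)
                   then PySem.List.slice cs (some (-1 : Int)) (some ((i : Int) + 1)) else best)
              else ((-1 : Int), best)) = ((-1 : Int), best) from by
            rw [if_neg (by decide), if_pos rfl, if_neg (by omega)]]
          rw [(ih (i + 1) hdrop' best).2]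
          simp [scan]
        · rw [show (if c = 'M' then (if (-1 : Int) < 0 then ((i : Int), best) else ((-1 : Int), best))
              else if c = '_' then ((-1 : Int), if 0 ≤ (-1 : Int) ∧ (i : Int) - (-1 : Int) + 1 > (best.length : Int)
                   then PySem.List.slice cs (some (-1 : Int)) (some ((i : Int) + 1)) else best)
              else ((-1 : Int), best)) = ((-1 : Int), best) from by
            rw [if_neg hM, if_neg hS]]
          rw [(ih (i + 1) hdrop' best).2]
          simp [scan, hM]

theorem bscan_eq_scan (cs : List Char) (best : List Char) :
    ((PySem.List.enumerate cs 0).foldl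
      (fun (st : Int × List Char) p =>
        if p.2 = 'M' then (if st.1 < 0 then (p.1, st.2) else st)
        else if p.2 = '_' then
          (-1, if 0 ≤ st.1 ∧ p.1 - st.1 + 1 > (st.2.length : Int)
               then PySem.List.slice cs (some st.1) (some (p.1 + 1)) else st.2)
        else st)
      ((-1 : Int), best)).2 = scan cs none best := by
  have := (bscan_aux cs cs 0 (by simp) best).2
  simpa using this

theorem a_inner (key : String) (value : PySem.Dict String String) :
    ∀ (ks : List String) (poss0 : List (List Char)) (prots : PySem.Dict String String),
    (ks.foldl
      (fun (st : List (List Char) × PySem.Dict String String) f =>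
        let poss_protein := st.1 ++ oframe (PySem.Dict.getD value f "")
        let cr := poss_protein.foldl
          (fun (cr : Int × List Char) s =>
            if (s.length : Int) > cr.1 then ((s.length : Int), s) else cr)
          (0, [])
        (poss_protein, st.2.insert key (String.ofList cr.2)))
      (poss0, prots)).2
    = if ks.isEmpty then prots
      else prots.insert key (String.ofList
        ((poss0 ++ (ks.map (fun f => oframe (PySem.Dict.getD value f ""))).flatten).foldl
          (fun (cr : Int × List Char) s =>
            if (s.length : Int) > cr.1 then ((s.length : Int), s) else cr)
          (0, [])).2) := by
  intro ks
  induction ks with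
  | nil => intro poss0 prots; rfl
  | cons f ks' ih =>
    intro poss0 prots
    rw [List.foldl_cons]
    rw [ih (poss0 ++ oframe (PySem.Dict.getD value f "")) _]
    by_cases hks : ks'.isEmpty
    · rw [if_pos hks, if_neg (by simp)]
      rw [List.isEmpty_iff] at hks
      subst hks
      simp
    · rw [if_neg hks, if_neg (by simp)]
      rw [PySem.Dict.insert_insert_self]
      simp [List.append_assoc]

theorem per_key_best (value : PySem.Dict String String) (hnd : value.keys.Nodup) :
    ((value.keys.map (fun f => oframe (PySem.Dict.getD value f ""))).flatten.foldl
        (fun (cr : Int × List Char) s =>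
          if (s.length : Int) > cr.1 then ((s.length : Int), s) else cr)
        (0, [])).2
    = value.values.foldl
        (fun (best : List Char) amino =>
          let cs := amino.toList
          ((PySem.List.enumerate cs 0).foldl
            (fun (st : Int × List Char) p =>
              if p.2 = 'M' then (if st.1 < 0 then (p.1, st.2) else st)
              else if p.2 = '_' then
                (-1, if 0 ≤ st.1 ∧ p.1 - st.1 + 1 > (st.2.length : Int)
                     then PySem.List.slice cs (some st.1) (some (p.1 + 1)) else st.2)
              else st)
            ((-1 : Int), best)).2)
        [] := by
  have h1 := maxrun_eq_foldl_compete
    ((value.keys.map (fun f => oframe (PySem.Dict.getD value f ""))).flatten) []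
  simp only [List.length_nil, Nat.cast_zero] at h1
  rw [h1]
  dsimp only
  rw [PySem.Dict.values_eq_map_keys value hnd "", List.foldl_flatten, List.foldl_map, List.foldl_map]
  have hfun : (fun (b : List Char) (f : String) => (oframe (PySem.Dict.getD value f "")).foldl compete b)
      = (fun (b : List Char) (f : String) =>
          (let cs := (PySem.Dict.getD value f "").toList
          ((PySem.List.enumerate cs 0).foldl
            (fun (st : Int × List Char) p =>
              if p.2 = 'M' then (if st.1 < 0 then (p.1, st.2) else st)
              else if p.2 = '_' then
                (-1, if 0 ≤ st.1 ∧ p.1 - st.1 + 1 > (st.2.length : Int)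
                     then PySem.List.slice cs (some st.1) (some (p.1 + 1)) else st.2)
              else st)
            ((-1 : Int), b)).2)) := by
    funext b f
    show (oframe (PySem.Dict.getD value f "")).foldl compete b = _
    rw [oframe_eq_frames]
    dsimp only
    rw [bscan_eq_scan, (scan_eq_foldl_frames _).2]
  rw [hfun]

theorem outer_step_eq (prots : PySem.Dict String String) (kv : String × List (String × String)) :
    (let value := PySem.Dict.ofList kv.2;
      ((value.keys.foldl
        (fun (st : List (List Char) × PySem.Dict String String) f =>
          let poss_protein := st.1 ++ oframe (PySem.Dict.getD value f "")
          let cr := poss_protein.foldl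
            (fun (cr : Int × List Char) s =>
              if (s.length : Int) > cr.1 then ((s.length : Int), s) else cr)
            (0, [])
          (poss_protein, st.2.insert kv.1 (String.ofList cr.2)))
        ([], prots)).2))
    = (let value := PySem.Dict.ofList kv.2;
      if value.items.isEmpty then prots
      else
        let best := value.values.foldl
          (fun (best : List Char) amino =>
            let cs := amino.toList
            ((PySem.List.enumerate cs 0).foldl
              (fun (st : Int × List Char) p =>
                if p.2 = 'M' then (if st.1 < 0 then (p.1, st.2) else st)
                else if p.2 = '_' then
                  (-1, if 0 ≤ st.1 ∧ p.1 - st.1 + 1 > (st.2.length : Int)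
                       then PySem.List.slice cs (some st.1) (some (p.1 + 1)) else st.2)
                else st)
              ((-1 : Int), best)).2)
          []
        prots.insert kv.1 (String.ofList best)) := by
  dsimp only
  rw [a_inner kv.1 (PySem.Dict.ofList kv.2) (PySem.Dict.ofList kv.2).keys [] prots]
  have hkeys : (PySem.Dict.ofList kv.2).keys.isEmpty = (PySem.Dict.ofList kv.2).items.isEmpty := by
    simp [PySem.Dict.keys]
  rw [hkeys]
  by_cases h : (PySem.Dict.ofList kv.2).items.isEmpty
  · rw [if_pos h, if_pos h]
  · rw [if_neg h, if_neg h]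
    congr 1
    congr 1
    rw [List.nil_append]
    exact per_key_best (PySem.Dict.ofList kv.2) (PySem.Dict.nodup_keys_ofList kv.2)

-- ===== VERDICT (by name: the statement is the Claim_ definition above) =====
theorem find_prots_spec : Claim_equal_find_prots := by
  intro dictionary _
  unfold Spec_find_prots find_prots find_prots_alt
  congr 1
  congr 1
  funext prots kv
  exact outer_step_eq prots kv
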